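-- pv_equiv track=rewrite | github.com/qigang47/pm15minv2 | src/pm15min/live/operator/categories.py | categorize_decision_reject_reasons
-- ===== SOURCE A (Python) =====
-- def categorize_decision_reject_reasons(reasons: list[object]) -> str | None:
--     tokens = [str(reason or "").strip().lower() for reason in reasons if str(reason or "").strip()]
--     if not tokens:
--         return None
--     token_set = set(tokens)
--     if (
--         "signal_not_ready" in token_set
--         or "offset_not_yet_open" in token_set
--         or "offset_window_expired" in token_set
--         or "missing_score_row" in token_set
--         or any(token.startswith("signal_") for token in token_set)
--     ):
--         return "signal_not_ready"
--     if "quote_missing_inputs" in token_set or any(token.startswith("quote_") for token in token_set):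
--         return "quote_inputs_missing"
--     if (
--         "confidence_below_threshold" in token_set
--         or "regime_direction_prob" in token_set
--         or "up_lcb_below_threshold" in token_set
--         or "up_ucb_above_threshold" in token_set
--         or "up_raw_not_above_midpoint" in token_set
--         or "down_raw_not_below_midpoint" in token_set
--         or "confidence_missing" in token_set
--     ):
--         return "confidence_threshold"
--     if "liquidity_guard_blocked" in token_set or any(token.startswith("liquidity_") for token in token_set):
--         return "liquidity_guard"
--     if "max_trades_per_offset" in token_set or "regime_trade_count_cap" in token_set or any(token.startswith("regime_") for token in token_set):
--         return "regime_guard"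
--     if "tail_space_too_far" in token_set:
--         return "tail_space_guard"
--     if (
--         "entry_price_missing" in token_set
--         or "entry_price_min" in token_set
--         or "entry_price_max" in token_set
--         or "net_edge_below_quote_threshold" in token_set
--         or "roi_net_below_threshold" in token_set
--     ):
--         return "entry_or_quote_threshold"
--     return "other"
-- ===== SOURCE B (Python) =====
-- _CATEGORIES = [
--     "signal_not_ready",
--     "quote_inputs_missing",
--     "confidence_threshold",
--     "liquidity_guard",
--     "regime_guard",
--     "tail_space_guard",
--     "entry_or_quote_threshold",
--     "other",
-- ]
--
-- _EXACT = {
--     "signal_not_ready": 0, "offset_not_yet_open": 0, "offset_window_expired": 0, "missing_score_row": 0,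
--     "quote_missing_inputs": 1,
--     "confidence_below_threshold": 2, "regime_direction_prob": 2, "up_lcb_below_threshold": 2,
--     "up_ucb_above_threshold": 2, "up_raw_not_above_midpoint": 2, "down_raw_not_below_midpoint": 2,
--     "confidence_missing": 2,
--     "liquidity_guard_blocked": 3,
--     "max_trades_per_offset": 4, "regime_trade_count_cap": 4,
--     "tail_space_too_far": 5,
--     "entry_price_missing": 6, "entry_price_min": 6, "entry_price_max": 6,
--     "net_edge_below_quote_threshold": 6, "roi_net_below_threshold": 6,
-- }
--
-- _PREFIXES = [("signal_", 0), ("quote_", 1), ("liquidity_", 3), ("regime_", 4)]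
--
--
-- def _priority(token):
--     p = _EXACT.get(token, 7)
--     for prefix, i in _PREFIXES:
--         if i < p and token.startswith(prefix):
--             p = i
--     return p
--
--
-- def categorize_decision_reject_reasons(reasons: list[object]) -> str | None:
--     best = 8
--     for reason in reasons:
--         token = str(reason or "").strip().lower()
--         if not token:
--             continue
--         p = _priority(token)
--         if p < best:
--             best = p
--     if best == 8:
--         return None
--     return _CATEGORIES[best]
-- ===== Notes on version B (the rewrite author's own statement) =====
-- stated objective: alternative
-- what changed: Replaces A's category-centric cascade (seven ordered branches, each scanning the whole token set for exact/prefix hits) with a token-centric single pass: each token is mapped once to its minimal category index via a token->index dict plus four prefix checks, and the running minimum index selects the category name from a table.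
import Mathlib
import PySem

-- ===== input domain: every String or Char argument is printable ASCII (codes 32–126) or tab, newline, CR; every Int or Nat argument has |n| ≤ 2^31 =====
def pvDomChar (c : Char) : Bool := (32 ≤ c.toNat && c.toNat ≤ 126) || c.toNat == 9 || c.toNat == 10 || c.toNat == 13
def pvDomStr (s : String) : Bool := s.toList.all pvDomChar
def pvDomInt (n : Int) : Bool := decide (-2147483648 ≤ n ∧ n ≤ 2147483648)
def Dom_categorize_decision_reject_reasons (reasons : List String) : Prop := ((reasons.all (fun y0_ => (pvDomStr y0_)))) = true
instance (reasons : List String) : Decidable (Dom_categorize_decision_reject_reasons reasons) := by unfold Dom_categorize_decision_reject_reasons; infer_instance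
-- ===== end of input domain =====

-- B replaces A's category-centric if-cascade (each branch scanning the token set) by a token-centric
-- single pass: each token is mapped once to its minimal category index (exact-token dict + prefix table)
-- and a running minimum selects the category (objective: alternative; same cost).
-- 'str(reason or "")' on a string argument is that string itself (or "" when empty, which strips to "" anyway),
-- so both ports strip the argument directly.

-- ===== PORT A =====
def categorize_decision_reject_reasons (reasons : List String) : Option String :=
  let tokens := (reasons.filter (fun r => PySem.Str.strip r != "")).map
      (fun r => PySem.Str.lower (PySem.Str.strip r))
  if tokens = [] then none
  else
    let ts : PySem.Set String := PySem.Set.ofList tokens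
    if PySem.Set.contains ts "signal_not_ready" || PySem.Set.contains ts "offset_not_yet_open"
        || PySem.Set.contains ts "offset_window_expired" || PySem.Set.contains ts "missing_score_row"
        || ts.any (fun t => PySem.Str.startswith t "signal_") then some "signal_not_ready"
    else if PySem.Set.contains ts "quote_missing_inputs"
        || ts.any (fun t => PySem.Str.startswith t "quote_") then some "quote_inputs_missing"
    else if PySem.Set.contains ts "confidence_below_threshold" || PySem.Set.contains ts "regime_direction_prob"
        || PySem.Set.contains ts "up_lcb_below_threshold" || PySem.Set.contains ts "up_ucb_above_threshold"
        || PySem.Set.contains ts "up_raw_not_above_midpoint" || PySem.Set.contains ts "down_raw_not_below_midpoint"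
        || PySem.Set.contains ts "confidence_missing" then some "confidence_threshold"
    else if PySem.Set.contains ts "liquidity_guard_blocked"
        || ts.any (fun t => PySem.Str.startswith t "liquidity_") then some "liquidity_guard"
    else if PySem.Set.contains ts "max_trades_per_offset" || PySem.Set.contains ts "regime_trade_count_cap"
        || ts.any (fun t => PySem.Str.startswith t "regime_") then some "regime_guard"
    else if PySem.Set.contains ts "tail_space_too_far" then some "tail_space_guard"
    else if PySem.Set.contains ts "entry_price_missing" || PySem.Set.contains ts "entry_price_min"
        || PySem.Set.contains ts "entry_price_max" || PySem.Set.contains ts "net_edge_below_quote_threshold"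
        || PySem.Set.contains ts "roi_net_below_threshold" then some "entry_or_quote_threshold"
    else some "other"

-- ===== PORT B =====
-- Source B's _CATEGORIES table
def pvCategories : List String :=
  ["signal_not_ready", "quote_inputs_missing", "confidence_threshold", "liquidity_guard",
   "regime_guard", "tail_space_guard", "entry_or_quote_threshold", "other"]

-- Source B's _EXACT dict: token -> category index
def pvExact : PySem.Dict String Nat := PySem.Dict.ofList
  [("signal_not_ready", 0), ("offset_not_yet_open", 0), ("offset_window_expired", 0), ("missing_score_row", 0),
   ("quote_missing_inputs", 1),
   ("confidence_below_threshold", 2), ("regime_direction_prob", 2), ("up_lcb_below_threshold", 2),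
   ("up_ucb_above_threshold", 2), ("up_raw_not_above_midpoint", 2), ("down_raw_not_below_midpoint", 2),
   ("confidence_missing", 2),
   ("liquidity_guard_blocked", 3),
   ("max_trades_per_offset", 4), ("regime_trade_count_cap", 4),
   ("tail_space_too_far", 5),
   ("entry_price_missing", 6), ("entry_price_min", 6), ("entry_price_max", 6),
   ("net_edge_below_quote_threshold", 6), ("roi_net_below_threshold", 6)]

-- Source B's _PREFIXES table
def pvPrefixes : List (String × Nat) :=
  [("signal_", 0), ("quote_", 1), ("liquidity_", 3), ("regime_", 4)]

-- Source B's _priority: minimal category index a single token matches (7 = none)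
def pvPriority (token : String) : Nat :=
  pvPrefixes.foldl
    (fun p pi => if pi.2 < p && PySem.Str.startswith token pi.1 then pi.2 else p)
    (PySem.Dict.getD pvExact token 7)

def categorize_decision_reject_reasons_alt (reasons : List String) : Option String :=
  let best := reasons.foldl
    (fun best reason =>
      let token := PySem.Str.lower (PySem.Str.strip reason)
      if token = "" then best
      else
        let p := pvPriority token
        if p < best then p else best) 8
  if best = 8 then none
  else some (pvCategories.getD best "")  -- _CATEGORIES[best]; best ≤ 7 here, so the in-range index is exact

-- ===== PRECONDITION & SPEC =====
def Spec_categorize_decision_reject_reasons (reasons : List String) (out : Option String) : Prop := out = categorize_decision_reject_reasons_alt reasons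
instance (reasons : List String) (out : Option String) : Decidable (Spec_categorize_decision_reject_reasons reasons out) := by unfold Spec_categorize_decision_reject_reasons; infer_instance

-- ===== CLAIM (what is proved, stated in full; the proofs are below) =====
def Claim_equal_categorize_decision_reject_reasons : Prop := ∀ (reasons : List String), Dom_categorize_decision_reject_reasons reasons → Spec_categorize_decision_reject_reasons reasons (categorize_decision_reject_reasons reasons)

-- ===== LEMMAS AND PROOFS =====

-- A's normalized token list (proof-side name for the identical term in port A)
def pvTokens (reasons : List String) : List String :=
  (reasons.filter (fun r => PySem.Str.strip r != "")).map
    (fun r => PySem.Str.lower (PySem.Str.strip r))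

theorem pvTokens_eq (reasons : List String) :
    (reasons.filter (fun r => PySem.Str.strip r != "")).map
      (fun r => PySem.Str.lower (PySem.Str.strip r)) = pvTokens reasons := rfl

-- proof-side name for the loop body of port B
def pvStep (best : Nat) (reason : String) : Nat :=
  let token := PySem.Str.lower (PySem.Str.strip reason)
  if token = "" then best
  else
    let p := pvPriority token
    if p < best then p else best

theorem pv_alt_eq (reasons : List String) :
    categorize_decision_reject_reasons_alt reasons =
      (if reasons.foldl pvStep 8 = 8 then none
       else some (pvCategories.getD (reasons.foldl pvStep 8) "")) := rfl

-- per-token match conditions of A's seven categories, in priority order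
def pvM0 (t : String) : Bool :=
  t == "signal_not_ready" || (t == "offset_not_yet_open" || (t == "offset_window_expired"
    || (t == "missing_score_row" || PySem.Str.startswith t "signal_")))
def pvM1 (t : String) : Bool :=
  t == "quote_missing_inputs" || PySem.Str.startswith t "quote_"
def pvM2 (t : String) : Bool :=
  t == "confidence_below_threshold" || (t == "regime_direction_prob" || (t == "up_lcb_below_threshold"
    || (t == "up_ucb_above_threshold" || (t == "up_raw_not_above_midpoint"
    || (t == "down_raw_not_below_midpoint" || t == "confidence_missing")))))
def pvM3 (t : String) : Bool :=
  t == "liquidity_guard_blocked" || PySem.Str.startswith t "liquidity_"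
def pvM4 (t : String) : Bool :=
  t == "max_trades_per_offset" || (t == "regime_trade_count_cap" || PySem.Str.startswith t "regime_")
def pvM5 (t : String) : Bool := t == "tail_space_too_far"
def pvM6 (t : String) : Bool :=
  t == "entry_price_missing" || (t == "entry_price_min" || (t == "entry_price_max"
    || (t == "net_edge_below_quote_threshold" || t == "roi_net_below_threshold")))

def pvRulesSpec : List (String → Bool) := [pvM0, pvM1, pvM2, pvM3, pvM4, pvM5, pvM6]

-- index of the first rule a token matches (length of fs = no match)
def pvPSpec : List (String → Bool) → String → Nat
  | [], _ => 0
  | f :: fs, t => if f t then 0 else pvPSpec fs t + 1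

-- index of the first rule some token of L matches (length of fs = no match)
def pvCSpec : List (String → Bool) → List String → Nat
  | [], _ => 0
  | f :: fs, L => if L.any f then 0 else pvCSpec fs L + 1

-- running minimum of pvPriority over a token list (8 = empty)
def pvBest : List String → Nat
  | [] => 8
  | t :: l => min (pvPriority t) (pvBest l)

theorem pvPSpec_le (fs : List (String → Bool)) (t : String) : pvPSpec fs t ≤ fs.length := by
  induction fs with
  | nil => simp [pvPSpec]
  | cons f fs ih => simp only [pvPSpec, List.length_cons]; split <;> omega

-- Source B's per-token priority IS the index of the first rule of A the token matches
theorem pvPriority_eq (t : String) : pvPriority t = pvPSpec pvRulesSpec t := by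
  by_cases e1 : t = "signal_not_ready"
  · subst e1; decide
  by_cases e2 : t = "offset_not_yet_open"
  · subst e2; decide
  by_cases e3 : t = "offset_window_expired"
  · subst e3; decide
  by_cases e4 : t = "missing_score_row"
  · subst e4; decide
  by_cases e5 : t = "quote_missing_inputs"
  · subst e5; decide
  by_cases e6 : t = "confidence_below_threshold"
  · subst e6; decide
  by_cases e7 : t = "regime_direction_prob"
  · subst e7; decide
  by_cases e8 : t = "up_lcb_below_threshold"
  · subst e8; decide
  by_cases e9 : t = "up_ucb_above_threshold"
  · subst e9; decide
  by_cases e10 : t = "up_raw_not_above_midpoint"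
  · subst e10; decide
  by_cases e11 : t = "down_raw_not_below_midpoint"
  · subst e11; decide
  by_cases e12 : t = "confidence_missing"
  · subst e12; decide
  by_cases e13 : t = "liquidity_guard_blocked"
  · subst e13; decide
  by_cases e14 : t = "max_trades_per_offset"
  · subst e14; decide
  by_cases e15 : t = "regime_trade_count_cap"
  · subst e15; decide
  by_cases e16 : t = "tail_space_too_far"
  · subst e16; decide
  by_cases e17 : t = "entry_price_missing"
  · subst e17; decide
  by_cases e18 : t = "entry_price_min"
  · subst e18; decide
  by_cases e19 : t = "entry_price_max"
  · subst e19; decide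
  by_cases e20 : t = "net_edge_below_quote_threshold"
  · subst e20; decide
  by_cases e21 : t = "roi_net_below_threshold"
  · subst e21; decide
  have hmk : pvExact = PySem.Dict.mk
      [("signal_not_ready", 0), ("offset_not_yet_open", 0), ("offset_window_expired", 0), ("missing_score_row", 0),
       ("quote_missing_inputs", 1),
       ("confidence_below_threshold", 2), ("regime_direction_prob", 2), ("up_lcb_below_threshold", 2),
       ("up_ucb_above_threshold", 2), ("up_raw_not_above_midpoint", 2), ("down_raw_not_below_midpoint", 2),
       ("confidence_missing", 2),
       ("liquidity_guard_blocked", 3),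
       ("max_trades_per_offset", 4), ("regime_trade_count_cap", 4),
       ("tail_space_too_far", 5),
       ("entry_price_missing", 6), ("entry_price_min", 6), ("entry_price_max", 6),
       ("net_edge_below_quote_threshold", 6), ("roi_net_below_threshold", 6)] := by decide
  have hget : PySem.Dict.getD pvExact t 7 = 7 := by
    rw [hmk]
    simp [PySem.Dict.getD_eq_get?_getD, PySem.Dict.get?, List.find?,
      beq_eq_false_iff_ne.mpr (Ne.symm e1), beq_eq_false_iff_ne.mpr (Ne.symm e2), beq_eq_false_iff_ne.mpr (Ne.symm e3), beq_eq_false_iff_ne.mpr (Ne.symm e4), beq_eq_false_iff_ne.mpr (Ne.symm e5), beq_eq_false_iff_ne.mpr (Ne.symm e6), beq_eq_false_iff_ne.mpr (Ne.symm e7), beq_eq_false_iff_ne.mpr (Ne.symm e8), beq_eq_false_iff_ne.mpr (Ne.symm e9), beq_eq_false_iff_ne.mpr (Ne.symm e10), beq_eq_false_iff_ne.mpr (Ne.symm e11), beq_eq_false_iff_ne.mpr (Ne.symm e12), beq_eq_false_iff_ne.mpr (Ne.symm e13), beq_eq_false_iff_ne.mpr (Ne.symm e14), beq_eq_false_iff_ne.mpr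 (Ne.symm e15), beq_eq_false_iff_ne.mpr (Ne.symm e16), beq_eq_false_iff_ne.mpr (Ne.symm e17), beq_eq_false_iff_ne.mpr (Ne.symm e18), beq_eq_false_iff_ne.mpr (Ne.symm e19), beq_eq_false_iff_ne.mpr (Ne.symm e20), beq_eq_false_iff_ne.mpr (Ne.symm e21)]
  by_cases s0 : PySem.Chars.startswith t.toList ['s', 'i', 'g', 'n', 'a', 'l', '_'] = true <;>
  by_cases s1 : PySem.Chars.startswith t.toList ['q', 'u', 'o', 't', 'e', '_'] = true <;>
  by_cases s3 : PySem.Chars.startswith t.toList ['l', 'i', 'q', 'u', 'i', 'd', 'i', 't', 'y', '_'] = true <;>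
  by_cases s4 : PySem.Chars.startswith t.toList ['r', 'e', 'g', 'i', 'm', 'e', '_'] = true <;>
    simp [pvPriority, pvPrefixes, hget, List.foldl_cons, List.foldl_nil,
      pvPSpec, pvRulesSpec, pvM0, pvM1, pvM2, pvM3, pvM4,
      pvM5, pvM6, beq_iff_eq, e1, e2, e3, e4, e5, e6, e7, e8, e9, e10, e11, e12, e13, e14,
      e15, e16, e17, e18, e19, e20, e21, s0, s1, s3, s4]

theorem pvPriority_le (t : String) : pvPriority t ≤ 7 := by
  have := pvPSpec_le pvRulesSpec t
  rw [pvPriority_eq]; simpa [pvRulesSpec] using this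

theorem pvCSpec_nil (fs : List (String → Bool)) : pvCSpec fs [] = fs.length := by
  induction fs with
  | nil => simp [pvCSpec]
  | cons f fs ih => simp [pvCSpec, ih]

theorem pvCSpec_cons (fs : List (String → Bool)) (t : String) (L : List String) :
    pvCSpec fs (t :: L) = min (pvPSpec fs t) (pvCSpec fs L) := by
  induction fs with
  | nil => simp [pvCSpec, pvPSpec]
  | cons f fs ih =>
      cases hf : f t <;> cases hl : L.any f <;>
        simp [pvCSpec, pvPSpec, List.any_cons, hf, hl, ih]

theorem pvCSpec_eq_min_best (L : List String) : pvCSpec pvRulesSpec L = min 7 (pvBest L) := by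
  induction L with
  | nil => simp [pvCSpec_nil, pvRulesSpec, pvBest]
  | cons t l ih =>
      rw [pvCSpec_cons, ih, ← pvPriority_eq]
      have := pvPriority_le t
      simp only [pvBest]; omega

theorem pv_lower_empty_iff (s : String) : PySem.Str.lower s = "" ↔ s = "" := by
  constructor
  · intro h
    have h2 := congrArg String.toList h
    simp only [PySem.Str.toList_lower] at h2
    unfold PySem.Chars.lower at h2
    simp at h2
    exact String.toList_inj.mp (by simp [h2])
  · intro h; subst h; rfl

-- the running minimum of B's loop over reasons is the minimum priority over A's token list
theorem pv_fold (reasons : List String) (a : Nat) (ha : a ≤ 8) :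
    reasons.foldl pvStep a = min a (pvBest (pvTokens reasons)) := by
  induction reasons generalizing a with
  | nil => simp [pvTokens, pvBest]; omega
  | cons r l ih =>
      rw [List.foldl_cons]
      by_cases hs : PySem.Str.strip r = ""
      · have hstep : pvStep a r = a := by
          have hl0 : PySem.Str.lower (PySem.Str.strip r) = "" := by
            rw [hs]; exact (pv_lower_empty_iff _).mpr rfl
          simp [pvStep, hl0]
        have hT : pvTokens (r :: l) = pvTokens l := by
          simp [pvTokens, hs]
        rw [hstep, ih a ha, hT]
      · have htok : ¬ PySem.Str.lower (PySem.Str.strip r) = "" := by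
          intro h; exact hs ((pv_lower_empty_iff _).mp h)
        have hp := pvPriority_le (PySem.Str.lower (PySem.Str.strip r))
        have hstep : pvStep a r = min a (pvPriority (PySem.Str.lower (PySem.Str.strip r))) := by
          simp only [pvStep, if_neg htok]
          split <;> omega
        have hT : pvTokens (r :: l)
            = PySem.Str.lower (PySem.Str.strip r) :: pvTokens l := by
          simp [pvTokens, hs]
        rw [hstep, ih _ (by omega), hT]
        simp only [pvBest]; omega

theorem pv_any_ofList {α : Type} [BEq α] [LawfulBEq α] (L : List α) (f : α → Bool) :
    (PySem.Set.ofList L).any f = L.any f := by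
  rw [Bool.eq_iff_iff]
  simp only [List.any_eq_true, PySem.Set.mem_ofList]

theorem pv_contains_ofList (L : List String) (x : String) :
    PySem.Set.contains (PySem.Set.ofList L) x = L.any (fun t => t == x) := by
  rw [List.any_beq', Bool.eq_iff_iff, PySem.Set.contains_iff, PySem.Set.mem_ofList,
    List.contains_iff_mem]

theorem pv_any_or (l : List String) (f g : String → Bool) :
    (l.any f || l.any g) = l.any (fun x => f x || g x) := by
  rw [Bool.eq_iff_iff]
  simp only [Bool.or_eq_true, List.any_eq_true]
  constructor
  · rintro (⟨x, hx, h⟩ | ⟨x, hx, h⟩) <;> exact ⟨x, hx, by simp [h]⟩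
  · rintro ⟨x, hx, h | h⟩
    exacts [Or.inl ⟨x, hx, h⟩, Or.inr ⟨x, hx, h⟩]

-- A's body with each category condition collected into "some token matches pvMi"
theorem pv_A_eq (reasons : List String) :
    categorize_decision_reject_reasons reasons =
      (if pvTokens reasons = [] then none
       else if (pvTokens reasons).any pvM0 then some "signal_not_ready"
       else if (pvTokens reasons).any pvM1 then some "quote_inputs_missing"
       else if (pvTokens reasons).any pvM2 then some "confidence_threshold"
       else if (pvTokens reasons).any pvM3 then some "liquidity_guard"
       else if (pvTokens reasons).any pvM4 then some "regime_guard"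
       else if (pvTokens reasons).any pvM5 then some "tail_space_guard"
       else if (pvTokens reasons).any pvM6 then some "entry_or_quote_threshold"
       else some "other") := by
  simp only [categorize_decision_reject_reasons, pvTokens_eq, pv_contains_ofList,
    pv_any_ofList, Bool.or_assoc, pv_any_or]
  rfl

theorem pv_main (reasons : List String) :
    categorize_decision_reject_reasons reasons = categorize_decision_reject_reasons_alt reasons := by
  rw [pv_A_eq, pv_alt_eq, pv_fold reasons 8 (by omega)]
  cases hL : pvTokens reasons with
  | nil => simp [pvBest]
  | cons t l =>
      have h7 : pvBest (t :: l) ≤ 7 := by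
        have := pvPriority_le t
        simp only [pvBest]; omega
      have hcs : pvCSpec pvRulesSpec (t :: l) = pvBest (t :: l) := by
        rw [pvCSpec_eq_min_best]; omega
      have hmin : min 8 (pvBest (t :: l)) = pvBest (t :: l) := by omega
      rw [hmin, ← hcs]
      have hne8 : ¬ pvCSpec pvRulesSpec (t :: l) = 8 := by
        rw [hcs]; omega
      simp only [if_neg hne8, if_neg (List.cons_ne_nil t l)]
      cases h0 : List.any (t :: l) pvM0
      case true => simp [pvCSpec, pvRulesSpec, h0, pvCategories]
      case false =>
      cases h1 : List.any (t :: l) pvM1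
      case true => simp [pvCSpec, pvRulesSpec, h0, h1, pvCategories]
      case false =>
      cases h2 : List.any (t :: l) pvM2
      case true => simp [pvCSpec, pvRulesSpec, h0, h1, h2, pvCategories]
      case false =>
      cases h3 : List.any (t :: l) pvM3
      case true => simp [pvCSpec, pvRulesSpec, h0, h1, h2, h3, pvCategories]
      case false =>
      cases h4 : List.any (t :: l) pvM4
      case true => simp [pvCSpec, pvRulesSpec, h0, h1, h2, h3, h4, pvCategories]
      case false =>
      cases h5 : List.any (t :: l) pvM5
      case true => simp [pvCSpec, pvRulesSpec, h0, h1, h2, h3, h4, h5, pvCategories]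
      case false =>
      cases h6 : List.any (t :: l) pvM6
      case true => simp [pvCSpec, pvRulesSpec, h0, h1, h2, h3, h4, h5, h6, pvCategories]
      case false => simp [pvCSpec, pvRulesSpec, h0, h1, h2, h3, h4, h5, h6, pvCategories]

-- ===== VERDICT (by name: the statement is the Claim_ definition above) =====
theorem categorize_decision_reject_reasons_spec : Claim_equal_categorize_decision_reject_reasons := by
  intro reasons _
  exact pv_main reasons
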